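-- pv_equiv track=rewrite | github.com/PsinaDev/Python-CLI-Framework | cli/application.py | _extract_config_file_arg
-- ===== SOURCE A (Python) =====
-- def _extract_config_file_arg(
--     args: list[str],
-- ) -> tuple[str | None, list[str]]:
--     """Pull --config-file value out of args before normal parsing."""
--     out: list[str] = []
--     config_file: str | None = None
--     i = 0
--     while i < len(args):
--         tok = args[i]
--         if tok == "--config-file":
--             if i + 1 >= len(args):
--                 raise ValueError(
--                     "--config-file requires a path argument"
--                 )
--             config_file = args[i + 1]
--             i += 2
--             continue
--         if tok.startswith("--config-file="):
--             config_file = tok.split("=", 1)[1]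
--             i += 1
--             continue
--         out.append(tok)
--         i += 1
--     return config_file, out
-- ===== SOURCE B (Python) =====
-- def _extract_config_file_arg(
--     args: list[str],
-- ) -> tuple[str | None, list[str]]:
--     """Pull --config-file value out of args before normal parsing."""
--     out: list[str] = []
--     values: list[str] = []
--     rest = args
--     while True:
--         hit = _split_at_hit(rest)
--         if hit is None:
--             out.extend(rest)
--             break
--         prefix, tok, rest = hit
--         out.extend(prefix)
--         if tok == "--config-file":
--             if not rest:
--                 raise ValueError(
--                     "--config-file requires a path argument"
--                 )
--             values.append(rest[0])
--             rest = rest[1:]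
--         else:
--             values.append(tok.split("=", 1)[1])
--     return (values[-1] if values else None), out
--
--
-- def _split_at_hit(xs):
--     """Locate the next --config-file occurrence: (hit-free prefix, hit token, remainder)."""
--     for j, t in enumerate(xs):
--         if t == "--config-file" or t.startswith("--config-file="):
--             return xs[:j], t, xs[j + 1:]
--     return None
-- ===== Notes on version B (the rewrite author's own statement) =====
-- stated objective: alternative
-- what changed: B replaces A's per-token index scan that overwrites config_file in place by a staged loop: a find-and-split helper locates each --config-file occurrence, the hit-free segment is copied wholesale into out, every value is collected into a list, and the last collected value is returned.
import Mathlib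
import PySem

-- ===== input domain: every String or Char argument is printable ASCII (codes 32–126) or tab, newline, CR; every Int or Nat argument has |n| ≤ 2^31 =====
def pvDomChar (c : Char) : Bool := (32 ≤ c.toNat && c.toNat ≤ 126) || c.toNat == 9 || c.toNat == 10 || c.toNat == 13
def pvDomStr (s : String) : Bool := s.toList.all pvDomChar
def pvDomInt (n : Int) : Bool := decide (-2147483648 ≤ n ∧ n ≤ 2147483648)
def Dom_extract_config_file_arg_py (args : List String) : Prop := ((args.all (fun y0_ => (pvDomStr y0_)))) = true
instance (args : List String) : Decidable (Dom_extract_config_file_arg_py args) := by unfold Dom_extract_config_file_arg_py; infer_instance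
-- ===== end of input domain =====

-- B replaces A's per-token index scan by a staged loop: a find-and-split helper locates each
-- --config-file occurrence, the hit-free segment is copied wholesale, all values are collected
-- in a list and the last one wins; objective: alternative decomposition (same cost).


-- ===== PORT A =====
-- tok.split("=", 1)[1]; faithful on every token where it is evaluated (both Pythons only
-- evaluate it when tok starts with "--config-file=", so the split has a part at index 1).
def pvSplitEq1 (tok : String) : String :=
  ((PySem.Str.splitMax? tok "=" 1).bind (fun l => PySem.List.pyGet? l 1)).getD ""

-- A's while loop over the index i, as structural recursion jumping one or two tokens;
-- the `rest = []` flag-at-end case is where Python raises ValueError (excluded by Pre_).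
def goA (args : List String) (cfg : Option String) (out : List String) :
    Option String × List String :=
  match args with
  | [] => (cfg, out)
  | tok :: rest =>
    if tok == "--config-file" then
      match rest with
      | [] => (cfg, out)          -- Python: raise ValueError (outside Pre_)
      | v :: rest' => goA rest' (some v) out
    else if PySem.Str.startswith tok "--config-file=" then
      goA rest (some (pvSplitEq1 tok)) out
    else
      goA rest cfg (out ++ [tok])

def extract_config_file_arg_py (args : List String) : Option String × List String :=
  goA args none []

-- ===== PORT B =====
-- _split_at_hit: next occurrence of the flag (either form) with the hit-free prefix and the remainder
def splitAtHit (xs : List String) : Option (List String × String × List String) :=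
  match xs with
  | [] => none
  | t :: rest =>
    if t == "--config-file" || PySem.Str.startswith t "--config-file=" then
      some ([], t, rest)
    else
      (splitAtHit rest).map (fun phr => (t :: phr.1, phr.2.1, phr.2.2))

-- termination helper for loopB (cited by its decreasing_by)
lemma splitAtHit_length {xs p : List String} {tok : String} {r : List String}
    (h : splitAtHit xs = some (p, tok, r)) : r.length < xs.length := by
  induction xs generalizing p tok r with
  | nil => simp [splitAtHit] at h
  | cons t rest ih =>
    unfold splitAtHit at h
    split at h
    · simp only [Option.some.injEq, Prod.mk.injEq] at h
      obtain ⟨h1, h2, h3⟩ := h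
      subst h3; simp
    · cases hr : splitAtHit rest with
      | none => rw [hr] at h; simp at h
      | some phr =>
        rw [hr] at h
        obtain ⟨p', tok', r'⟩ := phr
        simp only [Option.map_some, Option.some.injEq, Prod.mk.injEq] at h
        obtain ⟨h1, h2, h3⟩ := h
        subst h3
        have := ih hr
        simp only [List.length_cons]; omega

-- B's while loop: repeatedly split at the next hit, copy the segment, collect the value
def loopB (rest : List String) (out vals : List String) : List String × List String :=
  match hs : splitAtHit rest with
  | none => (out ++ rest, vals)
  | some (p, tok, []) =>
    if tok == "--config-file" then (out ++ p, vals)   -- Python: raise ValueError (outside Pre_)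
    else loopB [] (out ++ p) (vals ++ [pvSplitEq1 tok])
  | some (p, tok, v :: r') =>
    if tok == "--config-file" then loopB r' (out ++ p) (vals ++ [v])
    else loopB (v :: r') (out ++ p) (vals ++ [pvSplitEq1 tok])
  termination_by rest.length
  decreasing_by
  · have := splitAtHit_length hs; simpa using this
  · have := splitAtHit_length hs; simp only [List.length_cons] at this; omega
  · exact splitAtHit_length hs

def extract_config_file_arg_py_alt (args : List String) : Option String × List String :=
  let ov := loopB args [] []
  (ov.2.getLast?, ov.1)

-- ===== PRECONDITION & SPEC =====
-- length of the maximal all-"--config-file" suffix of the list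
def pvTrail (l : List String) : Nat :=
  match l with
  | [] => 0
  | x :: rest => if x == "--config-file" && pvTrail rest == rest.length
                 then pvTrail rest + 1 else pvTrail rest

-- Pre_ excludes exactly the inputs where both Pythons raise ValueError
-- ("--config-file requires a path argument"): an odd trailing run of "--config-file".
def Pre_extract_config_file_arg_py (args : List String) : Prop := pvTrail args % 2 = 0
instance (args : List String) : Decidable (Pre_extract_config_file_arg_py args) := by
  unfold Pre_extract_config_file_arg_py; infer_instance

def pvWitness_extract_config_file_arg_py : List String :=
  ["run", "--config-file", "cfg.toml", "--verbose"]

def Spec_extract_config_file_arg_py (args : List String) (out : Option String × List String) : Prop :=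
  out = extract_config_file_arg_py_alt args
instance (args : List String) (out : Option String × List String) :
    Decidable (Spec_extract_config_file_arg_py args out) := by
  unfold Spec_extract_config_file_arg_py; infer_instance

-- ===== CLAIM (what is proved, stated in full; the proofs are below) =====
def Claim_equal_extract_config_file_arg_py : Prop :=
  ∀ (args : List String), Dom_extract_config_file_arg_py args →
    Pre_extract_config_file_arg_py args →
    Spec_extract_config_file_arg_py args (extract_config_file_arg_py args)

-- ===== LEMMAS AND PROOFS =====
def pvIsHit (t : String) : Bool := t == "--config-file" || PySem.Str.startswith t "--config-file="

lemma splitAtHit_none_char {xs : List String} (h : splitAtHit xs = none) :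
    ∀ t ∈ xs, pvIsHit t = false := by
  induction xs with
  | nil => simp
  | cons t rest ih =>
    unfold splitAtHit at h
    split at h
    · simp at h
    · rename_i hcond
      intro x hx
      rcases List.mem_cons.mp hx with hx | hx
      · subst hx; simpa [pvIsHit] using hcond
      · cases hr : splitAtHit rest with
        | none => exact ih hr x hx
        | some phr => rw [hr] at h; simp at h

lemma splitAtHit_some_char {xs p : List String} {tok : String} {r : List String}
    (h : splitAtHit xs = some (p, tok, r)) :
    xs = p ++ tok :: r ∧ (∀ t ∈ p, pvIsHit t = false) ∧ pvIsHit tok = true := by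
  induction xs generalizing p with
  | nil => simp [splitAtHit] at h
  | cons t rest ih =>
    unfold splitAtHit at h
    split at h
    · rename_i hcond
      simp only [Option.some.injEq, Prod.mk.injEq] at h
      obtain ⟨h1, h2, h3⟩ := h
      subst h1; subst h2; subst h3
      exact ⟨rfl, by simp, by simpa [pvIsHit] using hcond⟩
    · rename_i hcond
      cases hr : splitAtHit rest with
      | none => rw [hr] at h; simp at h
      | some phr =>
        rw [hr] at h
        obtain ⟨p', tok', r'⟩ := phr
        simp only [Option.map_some, Option.some.injEq, Prod.mk.injEq] at h
        obtain ⟨h1, h2, h3⟩ := h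
        subst h2; subst h3
        obtain ⟨e1, e2, e3⟩ := ih hr
        subst h1
        refine ⟨by simp [e1], ?_, e3⟩
        intro x hx
        rcases List.mem_cons.mp hx with hx | hx
        · subst hx; simpa [pvIsHit] using hcond
        · exact e2 x hx

lemma goA_cons (tok : String) (rest : List String) (cfg : Option String) (out : List String) :
    goA (tok :: rest) cfg out =
      if (tok == "--config-file") = true then
        (match rest with
         | [] => (cfg, out)
         | v :: rest' => goA rest' (some v) out)
      else if PySem.Str.startswith tok "--config-file=" = true then
        goA rest (some (pvSplitEq1 tok)) out
      else goA rest cfg (out ++ [tok]) := by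
  rw [goA.eq_def]

-- A walks a hit-free segment token by token, just appending it
lemma goA_skip (p : List String) (hp : ∀ t ∈ p, pvIsHit t = false) :
    ∀ (rest : List String) (cfg : Option String) (out : List String),
      goA (p ++ rest) cfg out = goA rest cfg (out ++ p) := by
  induction p with
  | nil => intro rest cfg out; simp
  | cons a p' ih =>
    intro rest cfg out
    have ha : pvIsHit a = false := hp a (by simp)
    have h1 : (a == "--config-file") = false := by
      unfold pvIsHit at ha; cases h : (a == "--config-file") <;> simp_all
    have h2 : PySem.Str.startswith a "--config-file=" = false := by
      unfold pvIsHit at ha; cases h : PySem.Str.startswith a "--config-file=" <;> simp_all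
    rw [List.cons_append, goA_cons, if_neg (by rw [h1]; simp), if_neg (by rw [h2]; simp)]
    rw [ih (fun t ht => hp t (by simp [ht])) rest cfg (out ++ [a])]
    simp

lemma pvTrail_cons_eq (x : String) (l : List String) :
    pvTrail (x :: l) =
      if x == "--config-file" && pvTrail l == l.length then pvTrail l + 1 else pvTrail l := rfl

lemma pvTrail_append_nonflag (p : List String) (hp : ∀ t ∈ p, pvIsHit t = false) :
    ∀ X : List String, pvTrail (p ++ X) = pvTrail X := by
  induction p with
  | nil => intro X; simp
  | cons a p' ih =>
    intro X
    have ha : pvIsHit a = false := hp a (by simp)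
    have h1 : (a == "--config-file") = false := by
      unfold pvIsHit at ha; cases h : (a == "--config-file") <;> simp_all
    rw [List.cons_append, pvTrail_cons_eq, h1]
    simpa using ih (fun t ht => hp t (by simp [ht])) X

lemma pvTrail_le (l : List String) : pvTrail l ≤ l.length := by
  induction l with
  | nil => simp [pvTrail]
  | cons x rest ih => simp only [pvTrail, List.length_cons]; split <;> omega

lemma pvTrail_step2 (x v : String) (l : List String)
    (hx : (x == "--config-file") = true)
    (h : pvTrail (x :: v :: l) % 2 = 0) : pvTrail l % 2 = 0 := by
  have hle := pvTrail_le l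
  by_cases hall : pvTrail l = l.length
  · by_cases hv : (v == "--config-file") = true
    · have h1 : pvTrail (v :: l) = pvTrail l + 1 := by
        rw [pvTrail_cons_eq, hv]; simp [hall]
      have h2 : pvTrail (x :: v :: l) = pvTrail l + 2 := by
        rw [pvTrail_cons_eq, hx, h1]; simp [List.length_cons, hall]
      omega
    · have h1 : pvTrail (v :: l) = pvTrail l := by
        rw [pvTrail_cons_eq, eq_false_of_ne_true hv]; simp
      have h2 : pvTrail (x :: v :: l) = pvTrail l := by
        rw [pvTrail_cons_eq, hx, h1]
        have hne : ¬ pvTrail l = l.length + 1 := by omega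
        simp [hne]
      omega
  · have h1 : pvTrail (v :: l) = pvTrail l := by
      rw [pvTrail_cons_eq]; simp [hall]
    have h2 : pvTrail (x :: v :: l) = pvTrail l := by
      rw [pvTrail_cons_eq, hx, h1]
      have hne : ¬ pvTrail l = l.length + 1 := by omega
      simp [hne]
    omega

lemma pvTrail_flag_singleton (x : String) (hx : (x == "--config-file") = true) :
    pvTrail [x] = 1 := by
  simp [pvTrail, hx]

lemma loopB_none {rest : List String} (h : splitAtHit rest = none) (out vals : List String) :
    loopB rest out vals = (out ++ rest, vals) := by
  rw [loopB]; split <;> simp_all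

lemma loopB_some_nil {rest p : List String} {tok : String}
    (h : splitAtHit rest = some (p, tok, [])) (out vals : List String) :
    loopB rest out vals =
      (if tok == "--config-file" then (out ++ p, vals)
       else loopB [] (out ++ p) (vals ++ [pvSplitEq1 tok])) := by
  rw [loopB]; split <;> simp_all

lemma loopB_some_cons {rest p : List String} {tok v : String} {r' : List String}
    (h : splitAtHit rest = some (p, tok, v :: r')) (out vals : List String) :
    loopB rest out vals =
      (if tok == "--config-file" then loopB r' (out ++ p) (vals ++ [v])
       else loopB (v :: r') (out ++ p) (vals ++ [pvSplitEq1 tok])) := by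
  rw [loopB]; split <;> simp_all

-- the main invariant: A's two-speed token scan equals B's segment loop
lemma pv_main (n : Nat) :
    ∀ (args : List String), args.length ≤ n →
    ∀ (out vals : List String) (cfg cfg0 : Option String),
      pvTrail args % 2 = 0 → cfg = vals.getLast?.or cfg0 →
      goA args cfg out = ((loopB args out vals).2.getLast?.or cfg0, (loopB args out vals).1) := by
  induction n with
  | zero =>
    intro args h out vals cfg cfg0 _ hcv
    have : args = [] := List.eq_nil_of_length_eq_zero (Nat.le_zero.mp h)
    subst this
    rw [loopB_none (by simp [splitAtHit])]
    simp [goA, hcv]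
  | succ n ih =>
    intro args h out vals cfg cfg0 hpre hcv
    cases hs : splitAtHit args with
    | none =>
      have hp := splitAtHit_none_char hs
      have := goA_skip args hp [] cfg out
      rw [loopB_none hs]
      simpa [goA, hcv] using this
    | some phr =>
      obtain ⟨p, tok, r⟩ := phr
      obtain ⟨heq, hp, hhit⟩ := splitAtHit_some_char hs
      subst heq
      rw [goA_skip p hp (tok :: r) cfg out]
      by_cases hf : (tok == "--config-file") = true
      · rw [goA_cons, if_pos hf]
        cases r with
        | nil =>
          exfalso
          rw [pvTrail_append_nonflag p hp, pvTrail_flag_singleton tok hf] at hpre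
          omega
        | cons v r' =>
          rw [loopB_some_cons hs, if_pos hf]
          have hpre' : pvTrail r' % 2 = 0 := by
            rw [pvTrail_append_nonflag p hp] at hpre
            exact pvTrail_step2 tok v r' hf hpre
          have hlen : r'.length ≤ n := by
            have := List.length_append (as := p) (bs := tok :: v :: r')
            simp only [List.length_cons] at this h
            omega
          exact ih r' hlen (out ++ p) (vals ++ [v]) (some v) cfg0 hpre'
            (by simp)
      · have hf' : (tok == "--config-file") = false := eq_false_of_ne_true hf
        have hsw : PySem.Str.startswith tok "--config-file=" = true := by
          unfold pvIsHit at hhit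
          rcases Bool.or_eq_true_iff.mp hhit with h1 | h1
          · exact absurd h1 hf
          · exact h1
        rw [goA_cons, if_neg hf, if_pos hsw]
        have hpre' : pvTrail r % 2 = 0 := by
          rw [pvTrail_append_nonflag p hp, pvTrail_cons_eq, hf'] at hpre
          simpa using hpre
        have hlen : r.length ≤ n := by
          have := List.length_append (as := p) (bs := tok :: r)
          simp only [List.length_cons] at this h
          omega
        have hrec := ih r hlen (out ++ p) (vals ++ [pvSplitEq1 tok]) (some (pvSplitEq1 tok)) cfg0 hpre'
          (by simp)
        cases r with
        | nil => rw [loopB_some_nil hs]; simp only [hf', Bool.false_eq_true, if_false]; exact hrec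
        | cons v r2 => rw [loopB_some_cons hs]; simp only [hf', Bool.false_eq_true, if_false]; exact hrec

-- ===== VERDICT (by name: the statement is the Claim_ definition above) =====
theorem extract_config_file_arg_py_spec : Claim_equal_extract_config_file_arg_py := by
  intro args _ hpre
  unfold Spec_extract_config_file_arg_py extract_config_file_arg_py extract_config_file_arg_py_alt
  have := pv_main args.length args (Nat.le_refl _) [] [] none none hpre (by simp)
  simpa [Option.or_none] using this
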